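-- pv_equiv track=rewrite | github.com/jlaketrask/FREEVAL-LP | model_check.py | compute_segment_demand
-- ===== SOURCE A (Python) =====
-- xrange = range
--
-- def compute_segment_demand(num_seg, mainline_demand, ONRD, OFRD):
--     SD = []
--     SD.append(mainline_demand)
--     for seg in xrange(1, num_seg):
--         SD.append([])
--         for period in xrange(len(mainline_demand)):
--             SD[seg].append(SD[seg-1][period] + ONRD[seg][period]- OFRD[seg-1][period])
--     return SD
-- ===== SOURCE B (Python) =====
-- def compute_segment_demand(num_seg, mainline_demand, ONRD, OFRD):
--     cols = []
--     for period in range(len(mainline_demand)):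
--         acc = mainline_demand[period]
--         col = [acc]
--         for seg in range(1, num_seg):
--             acc += ONRD[seg][period] - OFRD[seg - 1][period]
--             col.append(acc)
--         cols.append(col)
--     n = max(num_seg, 1)
--     return [[col[s] for col in cols] for s in range(n)]
-- ===== Notes on version B (the rewrite author's own statement) =====
-- stated objective: alternative
-- what changed: Replaces A's row-major fill that appends each row while reading the previously stored row back out of the growing table with a column-major pass that carries a running accumulator per period (never reading the table back) and then transposes the columns into rows.
import Mathlib
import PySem

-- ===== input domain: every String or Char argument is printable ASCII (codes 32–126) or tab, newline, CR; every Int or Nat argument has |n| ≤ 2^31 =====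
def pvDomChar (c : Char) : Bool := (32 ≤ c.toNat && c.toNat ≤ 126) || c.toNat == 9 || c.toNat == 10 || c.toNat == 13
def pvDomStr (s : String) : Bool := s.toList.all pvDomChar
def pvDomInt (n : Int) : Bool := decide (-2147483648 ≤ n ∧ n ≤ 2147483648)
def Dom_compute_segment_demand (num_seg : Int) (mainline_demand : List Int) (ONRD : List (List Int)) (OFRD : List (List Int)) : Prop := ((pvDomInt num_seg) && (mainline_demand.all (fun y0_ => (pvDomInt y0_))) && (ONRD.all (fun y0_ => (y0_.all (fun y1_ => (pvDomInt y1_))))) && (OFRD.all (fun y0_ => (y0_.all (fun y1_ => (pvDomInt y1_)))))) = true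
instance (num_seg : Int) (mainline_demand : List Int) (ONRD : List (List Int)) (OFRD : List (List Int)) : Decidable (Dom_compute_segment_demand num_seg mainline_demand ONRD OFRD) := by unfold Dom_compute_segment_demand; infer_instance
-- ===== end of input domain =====

-- B replaces A's row-major fill that reads back the previous stored row with a column-major
-- accumulator pass (per-period running sum, then a transpose); same cost, different traversal (objective: alternative).

-- ===== PORT A =====
def compute_segment_demand (num_seg : Int) (mainline_demand : List Int) (ONRD : List (List Int)) (OFRD : List (List Int)) : List (List Int) :=
  (PySem.List.pyRange 1 num_seg 1).foldl
    (fun SD seg =>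
      SD ++ [(PySem.List.pyRange 0 (mainline_demand.length : Int) 1).foldl
        (fun row period =>
          row ++ [PySem.List.pyGetD (PySem.List.pyGetD SD (seg - 1) []) period 0
                  + PySem.List.pyGetD (PySem.List.pyGetD ONRD seg []) period 0
                  - PySem.List.pyGetD (PySem.List.pyGetD OFRD (seg - 1) []) period 0]) []])
    [mainline_demand]

-- ===== PORT B =====
def compute_segment_demand_alt (num_seg : Int) (mainline_demand : List Int) (ONRD : List (List Int)) (OFRD : List (List Int)) : List (List Int) :=
  let cols := (PySem.List.pyRange 0 (mainline_demand.length : Int) 1).foldl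
    (fun cols period =>
      let m := PySem.List.pyGetD mainline_demand period 0
      let st := (PySem.List.pyRange 1 num_seg 1).foldl
        (fun (st : List Int × Int) seg =>
          let acc := st.2 + PySem.List.pyGetD (PySem.List.pyGetD ONRD seg []) period 0
                     - PySem.List.pyGetD (PySem.List.pyGetD OFRD (seg - 1) []) period 0
          (st.1 ++ [acc], acc))
        ([m], m)
      cols ++ [st.1]) []
  let n := max num_seg 1
  (PySem.List.pyRange 0 n 1).map (fun s => cols.map (fun col => PySem.List.pyGetD col s 0))

-- ===== PRECONDITION & SPEC =====
-- Pre_ excludes exactly the inputs on which A raises IndexError (a needed ONRD/OFRD row missing or shorter than mainline_demand).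
def Pre_compute_segment_demand (num_seg : Int) (mainline_demand : List Int) (ONRD : List (List Int)) (OFRD : List (List Int)) : Prop :=
  2 ≤ num_seg → mainline_demand ≠ [] →
    (num_seg ≤ (ONRD.length : Int) ∧ num_seg - 1 ≤ (OFRD.length : Int) ∧
     (∀ r ∈ (ONRD.drop 1).take (num_seg - 1).toNat, mainline_demand.length ≤ r.length) ∧
     (∀ r ∈ OFRD.take (num_seg - 1).toNat, mainline_demand.length ≤ r.length))
instance (num_seg : Int) (mainline_demand : List Int) (ONRD : List (List Int)) (OFRD : List (List Int)) : Decidable (Pre_compute_segment_demand num_seg mainline_demand ONRD OFRD) := by unfold Pre_compute_segment_demand; infer_instance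

def pvWitness_compute_segment_demand : Int × List Int × List (List Int) × List (List Int) :=
  (2, [10, 20], [[0, 0], [3, 4]], [[1, 2]])

def Spec_compute_segment_demand (num_seg : Int) (mainline_demand : List Int) (ONRD : List (List Int)) (OFRD : List (List Int)) (out : List (List Int)) : Prop := out = compute_segment_demand_alt num_seg mainline_demand ONRD OFRD
instance (num_seg : Int) (mainline_demand : List Int) (ONRD : List (List Int)) (OFRD : List (List Int)) (out : List (List Int)) : Decidable (Spec_compute_segment_demand num_seg mainline_demand ONRD OFRD out) := by unfold Spec_compute_segment_demand; infer_instance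

-- ===== CLAIM (what is proved, stated in full; the proofs are below) =====
def Claim_equal_compute_segment_demand : Prop := ∀ (num_seg : Int) (mainline_demand : List Int) (ONRD : List (List Int)) (OFRD : List (List Int)), Dom_compute_segment_demand num_seg mainline_demand ONRD OFRD → Pre_compute_segment_demand num_seg mainline_demand ONRD OFRD → Spec_compute_segment_demand num_seg mainline_demand ONRD OFRD (compute_segment_demand num_seg mainline_demand ONRD OFRD)

-- ===== LEMMAS AND PROOFS =====

-- closed-form value of segment s, period p (both programs compute this)
def segf (md : List Int) (ONRD OFRD : List (List Int)) : Nat → Nat → Int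
  | 0, p => md.getD p 0
  | s + 1, p => segf md ONRD OFRD s p + (ONRD.getD (s + 1) []).getD p 0 - (OFRD.getD s []).getD p 0

theorem getD_map_range {α : Type} (f : Nat → α) (d : α) {n k : Nat} (h : k < n) :
    ((List.range n).map f).getD k d = f k := by
  simp [List.getD_eq_getElem?_getD, h]

theorem map_getD_range_self (md : List Int) :
    (List.range md.length).map (fun p => md.getD p 0) = md := by
  apply List.ext_getElem
  · simp
  · intro i h1 h2
    simp_all [List.getD_eq_getElem?_getD]

theorem foldA_inv (md : List Int) (ON OF : List (List Int)) (R : Nat) :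
    (((List.range R).map (fun k : Nat => (1 : Int) + (k : Int))).foldl
      (fun (SD : List (List Int)) (seg : Int) =>
        SD ++ [(PySem.List.pyRange 0 (md.length : Int) 1).foldl
          (fun row period =>
            row ++ [PySem.List.pyGetD (PySem.List.pyGetD SD (seg - 1) []) period 0
                    + PySem.List.pyGetD (PySem.List.pyGetD ON seg []) period 0
                    - PySem.List.pyGetD (PySem.List.pyGetD OF (seg - 1) []) period 0]) []])
      [md])
    = (List.range (R + 1)).map (fun s => (List.range md.length).map (fun p => segf md ON OF s p)) := by
  induction R with
  | zero =>
    simp only [List.range_zero, List.map_nil, List.foldl_nil, Nat.zero_add, List.range_one,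
      List.map_cons, List.map_nil]
    exact congrArg (fun l => [l]) (map_getD_range_self md).symm
  | succ R ih =>
    rw [List.range_succ, List.map_append, List.foldl_append, ih]
    simp only [List.map_cons, List.map_nil, List.foldl_cons, List.foldl_nil]
    rw [List.range_succ (n := R + 1), List.map_append]
    congr 1
    simp only [List.map_cons, List.map_nil]
    congr 1
    rw [PySem.List.foldl_append_singleton_eq_map, List.nil_append,
        PySem.List.pyRange_zero_natCast, List.map_map]
    apply List.map_congr_left
    intro p hp
    rw [List.mem_range] at hp
    simp only [Function.comp]
    have h1 : (1 : Int) + (R : Int) - 1 = ((R : Nat) : Int) := by push_cast; ring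
    have h2 : (1 : Int) + (R : Int) = ((R + 1 : Nat) : Int) := by omega
    rw [h1, h2, PySem.List.pyGetD_natCast, PySem.List.pyGetD_natCast,
        PySem.List.pyGetD_natCast, PySem.List.pyGetD_natCast, PySem.List.pyGetD_natCast,
        PySem.List.pyGetD_natCast]
    rw [getD_map_range _ _ (by omega : R < R + 1)]
    rw [getD_map_range _ _ hp]
    simp [segf]

theorem A_closed (num_seg : Int) (md : List Int) (ON OF : List (List Int)) :
    compute_segment_demand num_seg md ON OF
    = (List.range ((num_seg - 1).toNat + 1)).map
        (fun s => (List.range md.length).map (fun p => segf md ON OF s p)) := by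
  unfold compute_segment_demand
  rw [PySem.List.pyRange_one 1 num_seg]
  exact foldA_inv md ON OF (num_seg - 1).toNat

theorem foldB_inv (md : List Int) (ON OF : List (List Int)) (p : Nat) (R : Nat) :
    (((List.range R).map (fun k : Nat => (1 : Int) + (k : Int))).foldl
      (fun (st : List Int × Int) (seg : Int) =>
        let acc := st.2 + PySem.List.pyGetD (PySem.List.pyGetD ON seg []) (p : Int) 0
                   - PySem.List.pyGetD (PySem.List.pyGetD OF (seg - 1) []) (p : Int) 0
        (st.1 ++ [acc], acc))
      ([segf md ON OF 0 p], segf md ON OF 0 p))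
    = ((List.range (R + 1)).map (fun s => segf md ON OF s p), segf md ON OF R p) := by
  induction R with
  | zero => simp
  | succ R ih =>
    rw [List.range_succ, List.map_append, List.foldl_append, ih]
    simp only [List.map_cons, List.map_nil, List.foldl_cons, List.foldl_nil]
    have h1 : (1 : Int) + (R : Int) - 1 = ((R : Nat) : Int) := by push_cast; ring
    have h2 : (1 : Int) + (R : Int) = ((R + 1 : Nat) : Int) := by omega
    rw [h1, h2, PySem.List.pyGetD_natCast, PySem.List.pyGetD_natCast,
        PySem.List.pyGetD_natCast, PySem.List.pyGetD_natCast]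
    simp only [Prod.mk.injEq]
    refine ⟨?_, ?_⟩
    · rw [List.range_succ (n := R + 1), List.map_append]
      simp [segf]
    · simp [segf]

theorem B_closed (num_seg : Int) (md : List Int) (ON OF : List (List Int)) :
    compute_segment_demand_alt num_seg md ON OF
    = (List.range ((max num_seg 1).toNat)).map
        (fun s => (List.range md.length).map (fun p => segf md ON OF s p)) := by
  unfold compute_segment_demand_alt
  simp only
  rw [PySem.List.foldl_append_singleton_eq_map, List.nil_append,
      PySem.List.pyRange_zero_natCast, List.map_map,
      PySem.List.pyRange_one 0 (max num_seg 1), List.map_map]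
  have hN : (max num_seg 1 - 0).toNat = (max num_seg 1).toNat := by omega
  rw [hN]
  apply List.map_congr_left
  intro k hk
  rw [List.mem_range] at hk
  simp only [Function.comp]
  rw [List.map_map]
  apply List.map_congr_left
  intro p hp
  rw [List.mem_range] at hp
  simp only [Function.comp]
  rw [PySem.List.pyGetD_natCast, show md.getD p 0 = segf md ON OF 0 p from rfl,
      PySem.List.pyRange_one 1 num_seg]
  rw [List.foldl_map]
  have hfold := foldB_inv md ON OF p (num_seg - 1).toNat
  rw [List.foldl_map] at hfold
  rw [hfold]
  have hk2 : (0 : Int) + (k : Int) = ((k : Nat) : Int) := by ring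
  rw [hk2, PySem.List.pyGetD_natCast]
  exact getD_map_range _ _ (by omega)

-- ===== VERDICT (by name: the statement is the Claim_ definition above) =====
theorem compute_segment_demand_spec : Claim_equal_compute_segment_demand := by
  intro num_seg md ON OF _ _
  unfold Spec_compute_segment_demand
  rw [A_closed, B_closed]
  congr 2
  omega
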